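-- pv_equiv track=rewrite | github.com/helenakristela/Tucil1_13524109 | src/bruteforce.py | langkah_bruteforce
-- ===== SOURCE A (Python) =====
-- def validasi_input(board):
--     n = len(board)
--     if n == 0:
--         return False
--     for row in board:
--         if len(row) != n:
--             return False
--     for b in range(n):
--         for k in range(n):
--             now = board[b][k]
--             if len(now) != 1 or not('A' <= now <= 'Z'):
--                 return False
--     if n > 26:
--         return False
--     daerah = set_daerah(board)
--     if len(daerah) != n:
--         return False
--     return True
--
-- def set_daerah(board):
--     n = len(board)
--     s = set()
--     for b in range(n):
--         for k in range(n):
--             s.add(board[b][k])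
--     return s
--
-- def cek_daerah(board, queen):
--     daerah = set()
--     for (b,k) in queen:
--         now = board[b][k]
--         if now in daerah: return False
--         daerah.add(now)
--     return True
--
-- def cek_tetangga(queen):
--     posisi_queen = set(queen)
--     for b, k in queen:
--         if (b-1, k-1) in posisi_queen or (b-1, k) in posisi_queen or (b-1, k+1) in posisi_queen or (b, k-1) in posisi_queen or (b, k+1) in posisi_queen or (b+1, k-1) in posisi_queen or (b+1, k) in posisi_queen or (b+1, k+1) in posisi_queen: return False
--     return True
--
-- def cek_kolom_baris(queen, n):
--     if len(queen) != n : return False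
--     baris = set()
--     kolom = set()
--     for (b,k) in queen:
--         if b in baris or k in kolom: return False
--         baris.add(b)
--         kolom.add(k)
--     return True
--
-- def bangun_permutasi(array):
--     i = len(array) - 2
--     while i>=0 and array[i]>=array[i+1]: i -= 1
--     if i < 0 : return False
--     j = len(array) - 1
--     while array[j]<=array[i]: j -= 1
--     temp = array[i]
--     array[i] = array[j]
--     array[j] = temp
--     kiri = i + 1
--     kanan = len(array) - 1
--     while kiri < kanan:
--         temp = array[kiri]
--         array[kiri] = array[kanan]
--         array[kanan] = temp
--         kiri += 1
--         kanan -= 1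
--     return True
--
-- def semua_kemungkinan(n):
--     permutasi = list(range(n))
--     yield permutasi[:]
--     while bangun_permutasi(permutasi): yield permutasi[:]
--
-- def langkah_bruteforce(board, skip_time=False):
--     if not skip_time and not validasi_input(board):
--         yield 0, None, False
--         return
--     n = len(board)
--     kasus = 0
--     for permutasi in semua_kemungkinan(n):
--         kasus += 1
--         queen = [(r,permutasi[r]) for r in range(n)]
--         valid = cek_daerah(board,queen) and cek_tetangga(queen) and cek_kolom_baris(queen,n)
--         yield kasus, queen, valid
--         if valid: return
-- ===== SOURCE B (Python) =====
-- # B: recursive-selection permutation generation (itertools order) instead of A's in-place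
-- # next-permutation machinery; validation as one conjunction instead of staged early returns;
-- # validity of an attempt decided arithmetically on the permutation (distinct region colours
-- # by set size, no adjacent queens via consecutive-gap test -- correct because the rows are
-- # 0..n-1 in order and the columns are a permutation, so only row-adjacent queens can touch
-- # and rows/columns are automatically distinct) instead of A's three set-scanning checks.
--
-- def _valid_board(board):
--     n = len(board)
--     return (0 < n <= 26
--             and all(len(row) == n for row in board)
--             and all(len(c) == 1 and 'A' <= c <= 'Z' for row in board for c in row)
--             and len({c for row in board for c in row}) == n)
--
-- def _perms(items):
--     # all permutations of items by recursive selection, in index-lexicographic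
--     # order (exactly itertools.permutations(items))
--     if not items:
--         yield []
--         return
--     for i in range(len(items)):
--         for rest in _perms(items[:i] + items[i+1:]):
--             yield [items[i]] + rest
--
-- def langkah_bruteforce(board, skip_time=False):
--     if not skip_time and not _valid_board(board):
--         yield 0, None, False
--         return
--     n = len(board)
--     kasus = 0
--     for perm in _perms(list(range(n))):
--         kasus += 1
--         queen = list(enumerate(perm))
--         valid = (len({board[r][c] for r, c in queen}) == n
--                  and all(abs(b - a) > 1 for a, b in zip(perm, perm[1:])))
--         yield kasus, queen, valid
--         if valid:
--             return
-- ===== Notes on version B (the rewrite author's own statement) =====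
-- stated objective: alternative
-- what changed: Permutations are produced by recursive selection (itertools order) instead of the hand-rolled next-permutation state machine, validation becomes one conjunction instead of staged early returns, and attempt validity is decided arithmetically on the permutation (distinct colours by set size, adjacency by the consecutive-column gap test, row/column distinctness for free) instead of A's three set-scanning checks.
import Mathlib
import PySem

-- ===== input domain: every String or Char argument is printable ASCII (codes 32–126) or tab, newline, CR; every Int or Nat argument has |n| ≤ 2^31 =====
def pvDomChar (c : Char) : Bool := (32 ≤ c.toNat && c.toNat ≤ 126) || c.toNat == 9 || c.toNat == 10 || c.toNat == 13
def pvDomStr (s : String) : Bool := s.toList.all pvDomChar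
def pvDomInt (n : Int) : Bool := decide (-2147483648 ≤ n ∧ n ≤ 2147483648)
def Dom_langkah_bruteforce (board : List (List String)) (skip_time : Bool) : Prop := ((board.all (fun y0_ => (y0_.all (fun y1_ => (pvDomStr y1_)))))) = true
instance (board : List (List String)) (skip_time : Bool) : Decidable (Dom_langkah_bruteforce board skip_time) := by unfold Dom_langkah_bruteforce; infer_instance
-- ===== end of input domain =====

-- B replaces A's in-place next-permutation machinery by recursive-selection generation of the
-- same lexicographic permutation stream, A's staged validation by one conjunction, and A's
-- three set-scanning validity checks by an arithmetic test on the permutation (distinct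
-- colours by set size, adjacency by the consecutive-column gap); Python generators are ported
-- as the lists of their yields; A's in-place mutation of its permutation list is internal and
-- not observable.

-- ===== PORT A =====
-- board[b][k] / permutasi[r]: indices are nonnegative and in range at every call site
-- admitted by Pre_ (squareness / permutation of range(n)), so the total pyGetD is exact there.
def pg (a : List Int) (i : Int) : Int := PySem.List.pyGetD a i 0

def pgS (board : List (List String)) (b k : Int) : String :=
  PySem.List.pyGetD (PySem.List.pyGetD board b []) k ""

-- `while i>=0 and array[i]>=array[i+1]: i -= 1` — fuel (i+1).toNat is exact (i decreases by 1)
def whileI (a : List Int) : Nat → Int → Int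
  | 0, i => i
  | fuel+1, i => if 0 ≤ i ∧ pg a i ≥ pg a (i+1) then whileI a fuel (i-1) else i

-- `while array[j]<=array[i]: j -= 1` — the 0 ≤ j conjunct is a totality guard only: Python's
-- loop always stops at j ≥ i+1 > 0 because array[i] < array[i+1] (proved in the lemmas below)
def whileJ (a : List Int) (x : Int) : Nat → Int → Int
  | 0, j => j
  | fuel+1, j => if 0 ≤ j ∧ pg a j ≤ x then whileJ a x fuel (j-1) else j

-- temp = a[i]; a[i] = a[j]; a[j] = temp
def pySwap (a : List Int) (i j : Int) : List Int :=
  let temp := pg a i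
  let a1 := PySem.List.pySetD a i (pg a j)
  PySem.List.pySetD a1 j temp

-- `while kiri < kanan: swap; kiri += 1; kanan -= 1` — fuel (kanan-kiri).toNat is enough
def revLoop : Nat → List Int → Int → Int → List Int
  | 0, a, _, _ => a
  | fuel+1, a, kiri, kanan =>
      if kiri < kanan then revLoop fuel (pySwap a kiri kanan) (kiri+1) (kanan-1) else a

-- bangun_permutasi mutates its argument and returns a bool; ported as Option of the new list
def bangun_permutasi (a : List Int) : Option (List Int) :=
  let i := whileI a (PySem.List.len a - 2 + 1).toNat (PySem.List.len a - 2)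
  if i < 0 then none
  else
    let j := whileJ a (pg a i) (PySem.List.len a - 1 + 1).toNat (PySem.List.len a - 1)
    let a1 := pySwap a i j
    some (revLoop (PySem.List.len a1 - 1 - (i+1)).toNat a1 (i+1) (PySem.List.len a1 - 1))

-- the generator `semua_kemungkinan`, materialized: `yield permutasi[:]; while bangun_permutasi(permutasi): yield permutasi[:]`
-- fuel n! bounds the number of successor steps (proved exact below); unreachable-fuel-0 returns the list so far
def chainA (fuel : Nat) (p : List Int) : List (List Int) :=
  p :: (match bangun_permutasi p, fuel with
        | none, _ => []
        | some _, 0 => []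
        | some q, f+1 => chainA f q)

def semua_kemungkinan (n : Int) : List (List Int) :=
  chainA (Nat.factorial n.toNat) (PySem.List.pyRange 0 n 1)

def set_daerah (board : List (List String)) : PySem.Set String :=
  let n := PySem.List.len board
  (PySem.List.pyRange 0 n 1).foldl
    (fun s b => (PySem.List.pyRange 0 n 1).foldl (fun s k => PySem.Set.add s (pgS board b k)) s)
    PySem.Set.empty

def validasi_input (board : List (List String)) : Bool :=
  let n := PySem.List.len board
  if n == 0 then false
  else if !(board.all (fun row => PySem.List.len row == n)) then false
  else if !((PySem.List.pyRange 0 n 1).all (fun b => (PySem.List.pyRange 0 n 1).all (fun k =>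
      let now := pgS board b k
      -- `len(now) != 1 or not('A' <= now <= 'Z')`: under the len == 1 guard the Python string
      -- comparison is exactly the code-point comparison of the single character
      PySem.Str.len now == 1 && (let c := now.toList.headD ' '; decide ('A' ≤ c) && decide (c ≤ 'Z'))))) then false
  else if n > 26 then false
  else if !(PySem.List.len (set_daerah board) == n) then false
  else true

def cek_daerah_go (board : List (List String)) (daerah : PySem.Set String) :
    List (Int × Int) → Bool
  | [] => true
  | (b, k) :: rest =>
      let now := pgS board b k
      if PySem.Set.contains daerah now then false
      else cek_daerah_go board (PySem.Set.add daerah now) rest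

def cek_daerah (board : List (List String)) (queen : List (Int × Int)) : Bool :=
  cek_daerah_go board PySem.Set.empty queen

def cek_tetangga (queen : List (Int × Int)) : Bool :=
  let posisi_queen : PySem.Set (Int × Int) := PySem.Set.ofList queen
  queen.all (fun p =>
    let b := p.1; let k := p.2
    !(PySem.Set.contains posisi_queen (b-1, k-1) || PySem.Set.contains posisi_queen (b-1, k) ||
      PySem.Set.contains posisi_queen (b-1, k+1) || PySem.Set.contains posisi_queen (b, k-1) ||
      PySem.Set.contains posisi_queen (b, k+1) || PySem.Set.contains posisi_queen (b+1, k-1) ||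
      PySem.Set.contains posisi_queen (b+1, k) || PySem.Set.contains posisi_queen (b+1, k+1)))

def cek_kolom_baris_go (baris kolom : PySem.Set Int) : List (Int × Int) → Bool
  | [] => true
  | (b, k) :: rest =>
      if PySem.Set.contains baris b || PySem.Set.contains kolom k then false
      else cek_kolom_baris_go (PySem.Set.add baris b) (PySem.Set.add kolom k) rest

def cek_kolom_baris (queen : List (Int × Int)) (n : Int) : Bool :=
  if !(PySem.List.len queen == n) then false
  else cek_kolom_baris_go PySem.Set.empty PySem.Set.empty queen

-- the for-loop of langkah_bruteforce over the yielded permutations, with early return on valid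
def loopYieldA (board : List (List String)) (n : Int) (kasus : Int) :
    List (List Int) → List (Int × (Option (List (Int × Int))) × Bool)
  | [] => []
  | perm :: rest =>
      let kasus' := kasus + 1
      let queen := (PySem.List.pyRange 0 n 1).map (fun r => (r, pg perm r))
      let valid := cek_daerah board queen && cek_tetangga queen && cek_kolom_baris queen n
      (kasus', some queen, valid) :: (if valid then [] else loopYieldA board n kasus' rest)

def langkah_bruteforce (board : List (List String)) (skip_time : Bool) :
    List (Int × (Option (List (Int × Int))) × Bool) :=
  if !skip_time && !validasi_input board then [(0, none, false)]
  else
    let n := PySem.List.len board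
    loopYieldA board n 0 (semua_kemungkinan n)

-- ===== PORT B =====
-- Source B indexes board[r][c] only inside the colour set-comprehension; indices are in range on
-- every input admitted by Pre_, so the total lookup below is exact there.
def cellB (board : List (List String)) (r c : Int) : String :=
  PySem.List.pyGetD (PySem.List.pyGetD board r []) c ""

-- `len(c) == 1 and 'A' <= c <= 'Z'` — on a length-1 string Python's string comparison is the
-- code-point comparison of the single character
def okCellB (s : String) : Bool :=
  PySem.Str.len s == 1 && (let ch := s.toList.headD ' '; decide ('A' ≤ ch) && decide (ch ≤ 'Z'))

-- _valid_board: one conjunction, rows iterated directly, the colour set over the flattened board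
def validBoardB (board : List (List String)) : Bool :=
  let n := PySem.List.len board
  decide (0 < n) && decide (n ≤ 26)
    && board.all (fun row => PySem.List.len row == n)
    && board.all (fun row => row.all okCellB)
    && (PySem.List.len (PySem.Set.ofList (board.flatMap (fun row => row))) == n)

-- valid = len({board[r][c] for r,c in queen}) == n and all(abs(b-a) > 1 for a,b in zip(perm, perm[1:]))
def attemptValidB (board : List (List String)) (n : Int) (perm : List Int)
    (queen : List (Int × Int)) : Bool :=
  (PySem.List.len (PySem.Set.ofList (queen.map (fun q => cellB board q.1 q.2))) == n)
    && (perm.zip (PySem.List.slice perm (some 1) none)).all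
        (fun q => decide (1 < (q.2 - q.1).natAbs))

-- the yield loop over _perms(list(range(n))), queen = list(enumerate(perm))
def loopB (board : List (List String)) (n : Int) (kasus : Int) :
    List (List Int) → List (Int × (Option (List (Int × Int))) × Bool)
  | [] => []
  | perm :: rest =>
      let kasus' := kasus + 1
      let queen := PySem.List.enumerate perm 0
      let valid := attemptValidB board n perm queen
      (kasus', some queen, valid) :: (if valid then [] else loopB board n kasus' rest)

-- Source B's _perms is exactly the recursive-selection (index-lexicographic, itertools) enumeration:
-- ported as the prelude primitive PySem.List.permutations (same recursion: pick items[i],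
-- recurse on items[:i]+items[i+1:], prepend)
def langkah_bruteforce_alt (board : List (List String)) (skip_time : Bool) :
    List (Int × (Option (List (Int × Int))) × Bool) :=
  if !skip_time && !validBoardB board then [(0, none, false)]
  else
    let n := PySem.List.len board
    let rng := PySem.List.pyRange 0 n 1
    loopB board n 0 (PySem.List.permutations rng rng.length)

-- ===== PRECONDITION & SPEC =====
-- Pre_ excludes skip_time=True boards having a row shorter than len(board): there the search
-- indexes board[b][k] out of range and raises IndexError on most such boards (whether it does
-- depends on the check's short-circuiting, so the conservative shape condition is used; on the
-- cited all-"A" board A returns the full enumeration while B's colour set-comprehension, which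
-- does not short-circuit, raises).  With skip_time=False validation guarantees squareness
-- before any cell is indexed, so nothing is excluded there.
def Pre_langkah_bruteforce (board : List (List String)) (skip_time : Bool) : Prop :=
  skip_time = true → ∀ row ∈ board, board.length ≤ row.length
instance (board : List (List String)) (skip_time : Bool) : Decidable (Pre_langkah_bruteforce board skip_time) := by unfold Pre_langkah_bruteforce; infer_instance

def pvWitness_langkah_bruteforce : List (List String) × Bool := ([["A"]], false)

def Spec_langkah_bruteforce (board : List (List String)) (skip_time : Bool) (out : List (Int × (Option (List (Int × Int))) × Bool)) : Prop := out = langkah_bruteforce_alt board skip_time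
instance (board : List (List String)) (skip_time : Bool) (out : List (Int × (Option (List (Int × Int))) × Bool)) : Decidable (Spec_langkah_bruteforce board skip_time out) := by unfold Spec_langkah_bruteforce; infer_instance

-- ===== CLAIM (what is proved, stated in full; the proofs are below) =====
def Claim_equal_langkah_bruteforce : Prop := ∀ (board : List (List String)) (skip_time : Bool), Dom_langkah_bruteforce board skip_time → Pre_langkah_bruteforce board skip_time → Spec_langkah_bruteforce board skip_time (langkah_bruteforce board skip_time)

-- ===== LEMMAS AND PROOFS =====

-- ---- indexing basics ----

theorem pg_eq (a : List Int) (i : Int) (h : 0 ≤ i) : pg a i = a.getD i.toNat 0 := by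
  simp [pg, PySem.List.pyGetD_of_nonneg a 0 h]

theorem pg_cons (y : Int) (u : List Int) (k : Int) (h : 0 ≤ k) :
    pg (y :: u) (k + 1) = pg u k := by
  rw [pg_eq _ _ (by omega), pg_eq _ _ h]
  have hk : (k + 1).toNat = k.toNat + 1 := by omega
  rw [hk, List.getD_cons_succ]

theorem pg_zero (y : Int) (u : List Int) : pg (y :: u) 0 = y := by
  rw [pg_eq _ _ (by omega)]; rfl

theorem dec_pg (u : List Int) (hdec : u.Pairwise (· > ·)) (k : Int) (h0 : 0 ≤ k)
    (hlt : k + 1 < (u.length : Int)) : pg u k > pg u (k + 1) := by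
  rw [pg_eq _ _ h0, pg_eq _ _ (by omega)]
  have h1 : k.toNat < u.length := by omega
  have h2 : (k + 1).toNat < u.length := by omega
  rw [List.getD_eq_getElem _ _ h1, List.getD_eq_getElem _ _ h2]
  exact List.pairwise_iff_getElem.mp hdec _ _ h1 h2 (by omega)

-- ---- the pivot-search loop ----

theorem whileI_le (a : List Int) : ∀ (fuel : Nat) (i : Int), whileI a fuel i ≤ i := by
  intro fuel
  induction fuel with
  | zero => intro i; simp [whileI]
  | succ f ih =>
      intro i
      by_cases h : 0 ≤ i ∧ pg a i ≥ pg a (i + 1)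
      · have := ih (i - 1); simp only [whileI, if_pos h]; omega
      · simp [whileI, if_neg h]

theorem whileI_stop (a : List Int) : ∀ (fuel : Nat) (i : Int), (i + 1).toNat ≤ fuel →
    ¬(0 ≤ whileI a fuel i ∧ pg a (whileI a fuel i) ≥ pg a (whileI a fuel i + 1)) := by
  intro fuel
  induction fuel with
  | zero => intro i hf; simp only [whileI]; omega
  | succ f ih =>
      intro i hf
      by_cases h : 0 ≤ i ∧ pg a i ≥ pg a (i + 1)
      · simp only [whileI, if_pos h]; exact ih (i - 1) (by omega)
      · simpa [whileI, if_neg h] using h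

theorem whileI_scan (a : List Int) : ∀ (fuel : Nat) (i k : Int), whileI a fuel i < k → k ≤ i →
    0 ≤ k ∧ pg a k ≥ pg a (k + 1) := by
  intro fuel
  induction fuel with
  | zero => intro i k h1 h2; simp only [whileI] at h1; omega
  | succ f ih =>
      intro i k h1 h2
      by_cases h : 0 ≤ i ∧ pg a i ≥ pg a (i + 1)
      · simp only [whileI, if_pos h] at h1
        by_cases hk : k = i
        · subst hk; exact h
        · exact ih (i - 1) k h1 (by omega)
      · simp only [whileI, if_neg h] at h1; omega

theorem whileI_eq_of (a : List Int) : ∀ (fuel : Nat) (i i₀ : Int), (i + 1).toNat ≤ fuel →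
    i₀ ≤ i → ¬(0 ≤ i₀ ∧ pg a i₀ ≥ pg a (i₀ + 1)) →
    (∀ k, i₀ < k → k ≤ i → 0 ≤ k ∧ pg a k ≥ pg a (k + 1)) →
    whileI a fuel i = i₀ := by
  intro fuel
  induction fuel with
  | zero =>
      intro i i₀ hf h0 hstop hscan
      simp only [whileI]
      rcases lt_or_eq_of_le h0 with h | h
      · exact absurd ((hscan i h le_rfl).1) (by omega)
      · omega
  | succ f ih =>
      intro i i₀ hf h0 hstop hscan
      rcases lt_or_eq_of_le h0 with h | h
      · have hcond := hscan i h le_rfl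
        simp only [whileI, if_pos hcond]
        exact ih (i - 1) i₀ (by omega) (by omega) hstop (fun k hk1 hk2 => hscan k hk1 (by omega))
      · subst h; simp [whileI, if_neg hstop]

-- ---- the j-search loop ----

theorem whileJ_le (a : List Int) (x : Int) : ∀ (fuel : Nat) (j : Int), whileJ a x fuel j ≤ j := by
  intro fuel
  induction fuel with
  | zero => intro j; simp [whileJ]
  | succ f ih =>
      intro j
      by_cases h : 0 ≤ j ∧ pg a j ≤ x
      · have := ih (j - 1); simp only [whileJ, if_pos h]; omega
      · simp [whileJ, if_neg h]

theorem whileJ_stop (a : List Int) (x : Int) : ∀ (fuel : Nat) (j : Int), (j + 1).toNat ≤ fuel →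
    ¬(0 ≤ whileJ a x fuel j ∧ pg a (whileJ a x fuel j) ≤ x) := by
  intro fuel
  induction fuel with
  | zero => intro j hf; simp only [whileJ]; omega
  | succ f ih =>
      intro j hf
      by_cases h : 0 ≤ j ∧ pg a j ≤ x
      · simp only [whileJ, if_pos h]; exact ih (j - 1) (by omega)
      · simpa [whileJ, if_neg h] using h

theorem whileJ_scan (a : List Int) (x : Int) : ∀ (fuel : Nat) (j k : Int), whileJ a x fuel j < k →
    k ≤ j → 0 ≤ k ∧ pg a k ≤ x := by
  intro fuel
  induction fuel with
  | zero => intro j k h1 h2; simp only [whileJ] at h1; omega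
  | succ f ih =>
      intro j k h1 h2
      by_cases h : 0 ≤ j ∧ pg a j ≤ x
      · simp only [whileJ, if_pos h] at h1
        by_cases hk : k = j
        · subst hk; exact h
        · exact ih (j - 1) k h1 (by omega)
      · simp only [whileJ, if_neg h] at h1; omega

theorem whileJ_eq_of (a : List Int) (x : Int) : ∀ (fuel : Nat) (j j₀ : Int), (j + 1).toNat ≤ fuel →
    j₀ ≤ j → ¬(0 ≤ j₀ ∧ pg a j₀ ≤ x) →
    (∀ k, j₀ < k → k ≤ j → 0 ≤ k ∧ pg a k ≤ x) →
    whileJ a x fuel j = j₀ := by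
  intro fuel
  induction fuel with
  | zero =>
      intro j j₀ hf h0 hstop hscan
      simp only [whileJ]
      rcases lt_or_eq_of_le h0 with h | h
      · exact absurd ((hscan j h le_rfl).1) (by omega)
      · omega
  | succ f ih =>
      intro j j₀ hf h0 hstop hscan
      rcases lt_or_eq_of_le h0 with h | h
      · have hcond := hscan j h le_rfl
        simp only [whileJ, if_pos hcond]
        exact ih (j - 1) j₀ (by omega) (by omega) hstop (fun k hk1 hk2 => hscan k hk1 (by omega))
      · subst h; simp [whileJ, if_neg hstop]

-- ---- swap and segment reversal ----

theorem pySwap_len (a : List Int) (i j : Int) : (pySwap a i j).length = a.length := by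
  simp [pySwap, PySem.List.length_pySetD]

theorem pySwap_cons (y : Int) (u : List Int) (i j : Int) (hi : 0 ≤ i) (hj : 0 ≤ j) :
    pySwap (y :: u) (i + 1) (j + 1) = y :: pySwap u i j := by
  have h1 : (i + 1).toNat = i.toNat + 1 := by omega
  have h2 : (j + 1).toNat = j.toNat + 1 := by omega
  simp only [pySwap, pg_cons _ _ _ hi, pg_cons _ _ _ hj,
    PySem.List.pySetD_of_nonneg _ _ (by omega : (0:Int) ≤ i + 1),
    PySem.List.pySetD_of_nonneg _ _ (by omega : (0:Int) ≤ j + 1),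
    h1, h2, List.set_cons_succ]
  rw [PySem.List.pySetD_of_nonneg u (pg u j) hi, PySem.List.pySetD_of_nonneg _ (pg u i) hj]

theorem pySwap_append (w d : List Int) (i j : Int) (hi : 0 ≤ i) (hil : i < (w.length : Int))
    (hj : 0 ≤ j) (hjl : j < (w.length : Int)) :
    pySwap (w ++ d) i j = pySwap w i j ++ d := by
  have hgi : pg (w ++ d) i = pg w i := by
    rw [pg_eq _ _ hi, pg_eq _ _ hi, List.getD_append _ _ _ _ (by omega)]
  have hgj : pg (w ++ d) j = pg w j := by
    rw [pg_eq _ _ hj, pg_eq _ _ hj, List.getD_append _ _ _ _ (by omega)]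
  simp only [pySwap, hgi, hgj, PySem.List.pySetD_of_nonneg _ _ hi,
    PySem.List.pySetD_of_nonneg _ _ hj]
  rw [List.set_append, if_pos (by omega), List.set_append, if_pos (by simp [List.length_set]; omega)]

theorem revLoop_cons (y : Int) : ∀ (fuel : Nat) (a : List Int) (kiri kanan : Int), 0 ≤ kiri →
    revLoop fuel (y :: a) (kiri + 1) (kanan + 1) = y :: revLoop fuel a kiri kanan := by
  intro fuel
  induction fuel with
  | zero => intro a kiri kanan h; simp [revLoop]
  | succ f ih =>
      intro a kiri kanan h
      by_cases hlt : kiri < kanan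
      · have h1 : kiri + 1 < kanan + 1 := by omega
        simp only [revLoop, if_pos h1, if_pos hlt,
          pySwap_cons _ _ _ _ h (by omega : (0:Int) ≤ kanan)]
        have : kanan - 1 + 1 = kanan := by omega
        rw [show kanan = (kanan - 1) + 1 by omega] at *
        have := ih (pySwap a kiri (kanan - 1 + 1)) (kiri + 1) (kanan - 1) (by omega)
        simpa using this
      · have h1 : ¬(kiri + 1 < kanan + 1) := by omega
        simp [revLoop, if_neg h1, if_neg hlt]

theorem revLoop_append (d : List Int) : ∀ (fuel : Nat) (w : List Int) (kiri kanan : Int),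
    0 ≤ kiri → kanan < (w.length : Int) →
    revLoop fuel (w ++ d) kiri kanan = revLoop fuel w kiri kanan ++ d := by
  intro fuel
  induction fuel with
  | zero => intro w kiri kanan h1 h2; simp [revLoop]
  | succ f ih =>
      intro w kiri kanan h1 h2
      by_cases hlt : kiri < kanan
      · simp only [revLoop, if_pos hlt]
        rw [pySwap_append w d kiri kanan h1 (by omega) (by omega) h2]
        rw [ih (pySwap w kiri kanan) (kiri + 1) (kanan - 1) (by omega)
          (by rw [pySwap_len]; omega)]
      · simp [revLoop, if_neg hlt]

theorem revLoop_full : ∀ (N : Nat) (w : List Int) (fuel : Nat), w.length ≤ N →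
    w.length ≤ fuel + 1 → revLoop fuel w 0 ((w.length : Int) - 1) = w.reverse := by
  intro N
  induction N with
  | zero =>
      intro w fuel hN _
      have : w = [] := List.length_eq_zero_iff.mp (by omega)
      subst this
      cases fuel <;> simp [revLoop]
  | succ N ih =>
      intro w fuel hN hfuel
      by_cases hw : w.length ≤ 1
      · -- length 0 or 1: the loop does not run and reverse is the identity
        interval_cases h : w.length
        · have : w = [] := List.length_eq_zero_iff.mp h
          subst this; cases fuel <;> simp [revLoop]
        · obtain ⟨x, hx⟩ := List.length_eq_one_iff.mp h
          subst hx; cases fuel <;> simp [revLoop]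
      · -- length ≥ 2: w = x :: t ++ [z]
        push_neg at hw
        have hwne : w ≠ [] := by intro h; rw [h] at hw; simp at hw
        obtain ⟨x, rest, rfl⟩ := List.exists_cons_of_ne_nil hwne
        have hrest : rest ≠ [] := by intro h; subst h; simp at hw
        obtain ⟨t, z, rfl⟩ : ∃ t z, rest = t ++ [z] := ⟨rest.dropLast, rest.getLast hrest,
          (List.dropLast_append_getLast hrest).symm⟩
        obtain ⟨f, rfl⟩ : ∃ f, fuel = f + 1 := by
          cases fuel
          · exfalso; simp at hfuel
          · exact ⟨_, rfl⟩
        have hlen : ((x :: (t ++ [z])).length : Int) = (t.length : Int) + 2 := by simp; omega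
        have hcond : (0 : Int) < ((x :: (t ++ [z])).length : Int) - 1 := by rw [hlen]; omega
        simp only [revLoop, if_pos hcond]
        -- the first swap exchanges the two ends
        have hidx : (((x :: (t ++ [z])).length : Int) - 1).toNat = t.length + 1 := by
          simp
        have hswap : pySwap (x :: (t ++ [z])) 0 (((x :: (t ++ [z])).length : Int) - 1)
            = z :: (t ++ [x]) := by
          have hpg_last : pg (x :: (t ++ [z])) (((x :: (t ++ [z])).length : Int) - 1) = z := by
            rw [pg_eq _ _ (by omega), hidx, List.getD_eq_getElem _ _ (by simp)]
            simp
          simp only [pySwap, pg_zero, hpg_last,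
            PySem.List.pySetD_of_nonneg _ _ (by omega : (0:Int) ≤ 0),
            PySem.List.pySetD_of_nonneg _ _ (by omega : (0:Int) ≤ ((x :: (t ++ [z])).length : Int) - 1)]
          rw [hidx]
          simp only [Int.toNat_zero, List.set_cons_zero, List.set_cons_succ]
          rw [List.set_append, if_neg (by omega)]
          simp
        rw [hswap]
        have hk : ((x :: (t ++ [z])).length : Int) - 1 - 1 = ((t.length : Int) - 1) + 1 := by
          rw [hlen]; omega
        rw [hk, show (0:Int) + 1 = 0 + 1 from rfl,
          revLoop_cons z f (t ++ [x]) 0 ((t.length : Int) - 1) le_rfl]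
        by_cases ht : t = []
        · subst ht
          cases f <;> simp [revLoop]
        · have htpos : 0 < t.length := List.length_pos_iff.mpr ht
          rw [revLoop_append [x] f t 0 ((t.length : Int) - 1) le_rfl (by omega)]
          rw [ih t f (by simp at hN; omega) (by simp at hfuel; omega)]
          simp

-- ---- behaviour of bangun_permutasi ----

-- a non-increasing (here: strictly decreasing) array is the last permutation: returns False
theorem bangun_none (u : List Int) (hdec : u.Pairwise (· > ·)) : bangun_permutasi u = none := by
  simp only [bangun_permutasi, PySem.List.len_eq]
  by_cases hu : u.length ≤ 1
  · rw [if_pos (by have := whileI_le u ((u.length:Int) - 2 + 1).toNat ((u.length:Int) - 2); omega)]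
  · rw [whileI_eq_of u _ _ (-1) le_rfl (by omega) (by omega)
      (fun k hk1 hk2 => ⟨by omega, le_of_lt (dec_pg u hdec k (by omega) (by omega))⟩)]
    rw [if_pos (by omega)]

-- the pivot search never touches index 0 when the tail already has a successor:
-- bangun_permutasi acts on the tail only
theorem bangun_cons (y : Int) (u v : List Int) (h : bangun_permutasi u = some v) :
    bangun_permutasi (y :: u) = some (y :: v) := by
  simp only [bangun_permutasi, PySem.List.len_eq] at h
  set i' := whileI u ((u.length:Int) - 2 + 1).toNat ((u.length:Int) - 2) with hi'def
  by_cases hneg : i' < 0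
  · rw [if_pos hneg] at h; cases h
  · rw [if_neg hneg] at h
    have hi0 : 0 ≤ i' := by omega
    have hile : i' ≤ (u.length:Int) - 2 := whileI_le u _ _
    have hpivot : pg u i' < pg u (i' + 1) := by
      have := whileI_stop u ((u.length:Int) - 2 + 1).toNat ((u.length:Int) - 2) le_rfl
      rw [← hi'def] at this
      omega
    set x := pg u i' with hxdef
    set j' := whileJ u x ((u.length:Int) - 1 + 1).toNat ((u.length:Int) - 1) with hj'def
    have hjle : j' ≤ (u.length:Int) - 1 := whileJ_le u x _ _
    have hjge : i' + 1 ≤ j' := by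
      by_contra hc
      have := whileJ_scan u x ((u.length:Int) - 1 + 1).toNat ((u.length:Int) - 1) (i' + 1)
        (by rw [← hj'def]; omega) (by omega)
      omega
    have hjstop : ¬(pg u j' ≤ x) := by
      have := whileJ_stop u x ((u.length:Int) - 1 + 1).toNat ((u.length:Int) - 1) le_rfl
      rw [← hj'def] at this
      omega
    -- now compute the run on y :: u
    simp only [bangun_permutasi, PySem.List.len_eq, List.length_cons]
    have hcast : ((u.length + 1 : Nat) : Int) = (u.length : Int) + 1 := by push_cast; ring
    rw [hcast]
    have e1 : (u.length : Int) + 1 - 2 = (u.length : Int) - 1 := by ring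
    have e2 : (u.length : Int) + 1 - 1 = (u.length : Int) := by ring
    rw [e1, e2]
    have hwI : whileI (y :: u) ((u.length:Int) - 1 + 1).toNat ((u.length:Int) - 1) = i' + 1 := by
      apply whileI_eq_of (y :: u) _ _ (i' + 1) le_rfl (by omega)
      · intro hcon
        rcases hcon with ⟨-, hge⟩
        rw [pg_cons _ _ _ hi0, show i' + 1 + 1 = (i' + 1) + 1 from rfl,
          pg_cons _ _ _ (by omega : (0:Int) ≤ i' + 1)] at hge
        omega
      · intro k hk1 hk2
        refine ⟨by omega, ?_⟩
        rw [show k = (k - 1) + 1 by omega, pg_cons _ _ _ (by omega : (0:Int) ≤ k - 1),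
          show k - 1 + 1 + 1 = (k - 1 + 1) + 1 from rfl,
          pg_cons _ _ _ (by omega : (0:Int) ≤ k - 1 + 1)]
        have := whileI_scan u ((u.length:Int) - 2 + 1).toNat ((u.length:Int) - 2) (k - 1)
          (by rw [← hi'def]; omega) (by omega)
        have h2 := this.2
        rw [show k - 1 + 1 = k - 1 + 1 from rfl] at h2
        omega
    rw [hwI, if_neg (by omega : ¬(i' + 1 < 0))]
    have hpgx : pg (y :: u) (i' + 1) = x := pg_cons _ _ _ hi0
    rw [hpgx]
    have hwJ : whileJ (y :: u) x ((u.length:Int) + 1).toNat ((u.length:Int)) = j' + 1 := by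
      apply whileJ_eq_of (y :: u) x _ _ (j' + 1) (by omega) (by omega)
      · intro hcon
        rcases hcon with ⟨-, hle⟩
        rw [pg_cons _ _ _ (by omega : (0:Int) ≤ j')] at hle
        omega
      · intro k hk1 hk2
        refine ⟨by omega, ?_⟩
        rw [show k = (k - 1) + 1 by omega, pg_cons _ _ _ (by omega : (0:Int) ≤ k - 1)]
        have := whileJ_scan u x ((u.length:Int) - 1 + 1).toNat ((u.length:Int) - 1) (k - 1)
          (by rw [← hj'def]; omega) (by omega)
        omega
    have ecast2 : ((u.length:Int) - 1 + 1).toNat = ((u.length:Int) + 1 - 1 + 1).toNat - 1 := by omega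
    rw [show (u.length:Int) + 1 - 1 = (u.length:Int) by ring] at *
    rw [hwJ]
    rw [show pySwap (y :: u) (i' + 1) (j' + 1) = y :: pySwap u i' j' from
      pySwap_cons y u i' j' hi0 (by omega)]
    simp only [List.length_cons, pySwap_len, hcast]
    simp only [pySwap_len] at h
    have efuel : ((u.length:Int) + 1 - 1 - (i' + 1 + 1)).toNat = ((u.length:Int) - 1 - (i' + 1)).toNat := by
      omega
    have ekan : (u.length:Int) + 1 - 1 = ((u.length:Int) - 1) + 1 := by ring
    rw [efuel, ekan, show i' + 1 + 1 = (i' + 1) + 1 from rfl,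
      revLoop_cons y _ (pySwap u i' j') (i' + 1) ((u.length:Int) - 1) (by omega)]
    injection h with h
    rw [h]

-- at the last permutation of a block the pivot is position 0: the head y is replaced by its
-- successor m and the tail is re-sorted ascending by the reversal
set_option maxRecDepth 4096 in
set_option maxHeartbeats 2000000 in
theorem bangun_pivot (A C : List Int) (y m : Int)
    (hA : A.Pairwise (· < ·)) (hC : C.Pairwise (· < ·))
    (hAy : ∀ a ∈ A, a < y) (hym : y < m) (hmC : ∀ c ∈ C, m < c) :
    bangun_permutasi (y :: (C.reverse ++ m :: A.reverse)) = some (m :: (A ++ y :: C)) := by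
  have hlenu : (C.reverse ++ m :: A.reverse).length = C.length + A.length + 1 := by
    simp; omega
  have hu_dec : (C.reverse ++ m :: A.reverse).Pairwise (· > ·) := by
    refine List.pairwise_append.mpr ⟨List.pairwise_reverse.mpr (hC.imp fun h => h), ?_, ?_⟩
    · refine List.pairwise_cons.mpr ⟨?_, List.pairwise_reverse.mpr (hA.imp fun h => h)⟩
      intro z hz
      have := hAy z (List.mem_reverse.mp hz)
      omega
    · intro c' hc' z hz
      have hmc := hmC c' (List.mem_reverse.mp hc')
      rcases List.mem_cons.mp hz with rfl | hzA
      · omega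
      · have := hAy z (List.mem_reverse.mp hzA)
        omega
  have hu0 : y < pg (C.reverse ++ m :: A.reverse) 0 := by
    rw [pg_eq _ _ le_rfl]
    simp only [Int.toNat_zero]
    by_cases hCc : C = []
    · rw [hCc]
      simp
      omega
    · have hCpos : 0 < C.reverse.length := by
        simp only [List.length_reverse]
        exact List.length_pos_iff.mpr hCc
      rw [List.getD_append _ _ _ _ hCpos]
      rw [List.getD_eq_getElem _ _ hCpos]
      have hmem : C.reverse[0] ∈ C := List.mem_reverse.mp (List.getElem_mem _)
      have := hmC _ hmem
      omega
  simp only [bangun_permutasi, PySem.List.len_eq, List.length_cons, hlenu]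
  have hcast : ((C.length + A.length + 1 + 1 : Nat) : Int)
      = (C.length : Int) + (A.length : Int) + 2 := by push_cast; ring
  rw [hcast]
  have hwI : whileI (y :: (C.reverse ++ m :: A.reverse))
      ((C.length : Int) + (A.length : Int) + 2 - 2 + 1).toNat
      ((C.length : Int) + (A.length : Int) + 2 - 2) = 0 := by
    apply whileI_eq_of _ _ _ 0 le_rfl (by omega)
    · intro hcon
      rcases hcon with ⟨-, hge⟩
      rw [pg_zero, show (0:Int) + 1 = 0 + 1 from rfl, pg_cons _ _ _ le_rfl] at hge
      omega
    · intro k hk1 hk2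
      refine ⟨by omega, ?_⟩
      rw [show k = (k - 1) + 1 by omega, pg_cons _ _ _ (by omega : (0:Int) ≤ k - 1),
        show k - 1 + 1 + 1 = (k - 1 + 1) + 1 from rfl,
        pg_cons _ _ _ (by omega : (0:Int) ≤ k - 1 + 1)]
      have := dec_pg _ hu_dec (k - 1) (by omega) (by rw [hlenu]; push_cast; omega)
      omega
  rw [hwI, if_neg (by omega : ¬(0:Int) < 0), pg_zero]
  have hpgm : pg (C.reverse ++ m :: A.reverse) (C.length : Int) = m := by
    rw [pg_eq _ _ (by omega)]
    rw [List.getD_append_right _ _ _ _ (by simp)]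
    simp
  have hwJ : whileJ (y :: (C.reverse ++ m :: A.reverse)) y
      ((C.length : Int) + (A.length : Int) + 2 - 1 + 1).toNat
      ((C.length : Int) + (A.length : Int) + 2 - 1) = (C.length : Int) + 1 := by
    apply whileJ_eq_of _ _ _ _ ((C.length : Int) + 1) (by omega) (by omega)
    · intro hcon
      rcases hcon with ⟨-, hle⟩
      rw [pg_cons _ _ _ (by omega : (0:Int) ≤ (C.length : Int)), hpgm] at hle
      omega
    · intro k hk1 hk2
      refine ⟨by omega, ?_⟩
      rw [show k = (k - 1) + 1 by omega, pg_cons _ _ _ (by omega : (0:Int) ≤ k - 1)]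
      -- index k-1 lies in the A.reverse region: the value is an element of A, hence < y
      rw [pg_eq _ _ (by omega)]
      rw [List.getD_append_right _ _ _ _ (by simp only [List.length_reverse]; omega)]
      obtain ⟨s, hs, hslt⟩ : ∃ s, (k-1).toNat - C.reverse.length = s + 1 ∧ s < A.reverse.length := by
        refine ⟨(k-1).toNat - C.reverse.length - 1, ?_, ?_⟩ <;>
          simp only [List.length_reverse] <;> omega
      rw [hs, List.getD_cons_succ]
      rw [List.getD_eq_getElem _ _ hslt]
      have hmem : A.reverse[s] ∈ A := List.mem_reverse.mp (List.getElem_mem _)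
      have := hAy _ hmem
      omega
  rw [hwJ]
  have hswap : pySwap (y :: (C.reverse ++ m :: A.reverse)) 0 ((C.length : Int) + 1)
      = m :: (C.reverse ++ y :: A.reverse) := by
    have hpga : pg (y :: (C.reverse ++ m :: A.reverse)) ((C.length : Int) + 1) = m := by
      rw [pg_cons _ _ _ (by omega : (0:Int) ≤ (C.length : Int)), hpgm]
    simp only [pySwap, pg_zero, hpga,
      PySem.List.pySetD_of_nonneg _ _ (le_refl (0:Int)),
      PySem.List.pySetD_of_nonneg _ _ (by omega : (0:Int) ≤ (C.length : Int) + 1)]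
    rw [show ((C.length : Int) + 1).toNat = C.length + 1 by omega]
    simp only [Int.toNat_zero, List.set_cons_zero, List.set_cons_succ]
    rw [List.set_append, if_neg (by simp)]
    simp
  rw [hswap]
  simp only [List.length_cons, List.length_append, List.length_reverse]
  have hcast2 : ((C.length + (A.length + 1) + 1 : Nat) : Int)
      = (C.length : Int) + (A.length : Int) + 2 := by push_cast; ring
  rw [hcast2]
  have hkan : (C.length : Int) + (A.length : Int) + 2 - 1
      = ((C.length : Int) + (A.length : Int)) + 1 := by ring
  rw [hkan, revLoop_cons m _ (C.reverse ++ y :: A.reverse) 0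
    ((C.length : Int) + (A.length : Int)) le_rfl]
  have hwlen : ((C.reverse ++ y :: A.reverse).length : Int) - 1
      = (C.length : Int) + (A.length : Int) := by simp; push_cast; omega
  rw [← hwlen]
  rw [revLoop_full (C.reverse ++ y :: A.reverse).length (C.reverse ++ y :: A.reverse) _ le_rfl
    (by simp; omega)]
  simp

-- ---- the recursive-selection enumeration (port of B's generator) ----

-- block i of the enumeration: permutations starting with s[i]
def blockP (s : List Int) (i : Nat) : List (List Int) :=
  (PySem.List.permutations (s.eraseIdx i) (s.length - 1)).map (fun p => s.getD i 0 :: p)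

theorem perms_eq (s : List Int) (hs : s ≠ []) :
    PySem.List.permutations s s.length = (List.range s.length).flatMap (blockP s) := by
  obtain ⟨x, xs, rfl⟩ := List.exists_cons_of_ne_nil hs
  rw [show (x :: xs).length = xs.length + 1 from rfl, PySem.List.permutations]
  apply List.flatMap_congr
  intro i hi
  have hilt : i < (x :: xs).length := List.mem_range.mp hi
  rw [List.getElem?_eq_getElem hilt]
  simp only [blockP]
  rw [List.getD_eq_getElem _ _ hilt]
  rfl

theorem P_head : ∀ (s : List Int), (PySem.List.permutations s s.length).head? = some s := by
  intro s
  induction s with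
  | nil => rfl
  | cons x xs ih =>
      rw [perms_eq _ (List.cons_ne_nil x xs),
        show (x :: xs).length = xs.length + 1 from rfl, List.range_succ_eq_map,
        List.flatMap_cons]
      have hblock : blockP (x :: xs) 0
          = (PySem.List.permutations xs xs.length).map (fun p => x :: p) := by
        simp [blockP]
      rw [List.head?_append_of_ne_nil]
      · rw [hblock, List.head?_map, ih]
        rfl
      · rw [hblock]
        intro hcon
        rw [List.map_eq_nil_iff.mp hcon] at ih
        cases ih

theorem P_ne (s : List Int) : PySem.List.permutations s s.length ≠ [] := by
  intro h
  have := P_head s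
  rw [h] at this
  cases this

theorem P_last : ∀ (N : Nat) (s : List Int), s.length ≤ N →
    (PySem.List.permutations s s.length).getLast? = some s.reverse := by
  intro N
  induction N with
  | zero =>
      intro s hN
      have : s = [] := List.length_eq_zero_iff.mp (by omega)
      subst this; rfl
  | succ N ih =>
      intro s hN
      by_cases hs : s = []
      · subst hs; rfl
      · obtain ⟨m, hm⟩ : ∃ m, s.length = m + 1 := by
          cases hlen : s.length
          · exact absurd (List.length_eq_zero_iff.mp hlen) hs
          · exact ⟨_, rfl⟩
        rw [perms_eq s hs, hm, List.range_succ, List.flatMap_append, List.flatMap_singleton]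
        have hbl : blockP s m = (PySem.List.permutations s.dropLast s.dropLast.length).map
            (fun p => s.getD m 0 :: p) := by
          have h1 : s.eraseIdx m = s.dropLast := by
            rw [show m = s.length - 1 by omega]
            exact List.eraseIdx_length_sub_one
          have h2 : s.dropLast.length = s.length - 1 := by simp
          rw [blockP, h1, h2, hm]
        have hne : blockP s m ≠ [] := by
          rw [hbl]
          intro hcon
          exact P_ne _ (List.map_eq_nil_iff.mp hcon)
        rw [List.getLast?_append, hbl, List.getLast?_map,
          ih s.dropLast (by simp; omega)]
        have hgetD : s.getD m 0 = s.getLast hs := by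
          rw [List.getD_eq_getElem _ _ (by omega), List.getLast_eq_getElem]
          congr 1
          omega
        rw [hgetD]
        have hrev : s.reverse = s.getLast hs :: s.dropLast.reverse := by
          conv_lhs => rw [← List.dropLast_append_getLast hs]
          simp
        rw [hrev]
        rfl

theorem P_len : ∀ (N : Nat) (s : List Int), s.length ≤ N →
    (PySem.List.permutations s s.length).length = Nat.factorial s.length := by
  intro N
  induction N with
  | zero =>
      intro s hN
      have : s = [] := List.length_eq_zero_iff.mp (by omega)
      subst this; rfl
  | succ N ih =>
      intro s hN
      by_cases hs : s = []
      · subst hs; rfl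
      · obtain ⟨m, hm⟩ : ∃ m, s.length = m + 1 := by
          cases hlen : s.length
          · exact absurd (List.length_eq_zero_iff.mp hlen) hs
          · exact ⟨_, rfl⟩
        rw [perms_eq s hs, List.length_flatMap]
        have hcong : (List.range s.length).map (fun i => (blockP s i).length)
            = (List.range s.length).map (fun _ => Nat.factorial (s.length - 1)) := by
          apply List.map_congr_left
          intro i hi
          have hilt : i < s.length := List.mem_range.mp hi
          have hlen1 : (s.eraseIdx i).length = s.length - 1 := by
            rw [List.length_eraseIdx]
            simp [hilt]
          simp only [blockP, List.length_map]
          rw [← hlen1, ih (s.eraseIdx i) (by omega), hlen1]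
        rw [hcong, List.map_const', List.sum_replicate, smul_eq_mul, List.length_range]
        rw [hm, show m + 1 - 1 = m from rfl, Nat.factorial_succ]

-- chains concatenate when each piece chains and the junctions step
theorem isChain_flatten {α : Type} (R : α → α → Prop) :
    ∀ (Ls : List (List α)), (∀ l ∈ Ls, l ≠ []) → (∀ l ∈ Ls, List.IsChain R l) →
    List.IsChain (fun l1 l2 => ∀ a ∈ l1.getLast?, ∀ b ∈ l2.head?, R a b) Ls →
    List.IsChain R Ls.flatten := by
  intro Ls
  induction Ls with
  | nil => intro _ _ _; simp
  | cons l1 rest ih =>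
      cases rest with
      | nil =>
          intro _ h2 _
          rw [List.flatten_cons, List.flatten_nil, List.append_nil]
          exact h2 l1 (by simp)
      | cons l2 rest2 =>
          intro h1 h2 h3
          rw [List.flatten_cons]
          apply List.isChain_append.mpr
          obtain ⟨hlink, htail⟩ := List.isChain_cons_cons.mp h3
          refine ⟨h2 l1 (by simp), ih (fun l hl => h1 l (by simp [hl]))
            (fun l hl => h2 l (by simp [hl])) htail, ?_⟩
          intro a ha b hb
          rw [List.flatten_cons, List.head?_append_of_ne_nil _ (h1 l2 (by simp))] at hb
          exact hlink a ha b hb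

theorem P_chain : ∀ (N : Nat) (s : List Int), s.length ≤ N → s.Pairwise (· < ·) →
    List.IsChain (fun p q => bangun_permutasi p = some q)
      (PySem.List.permutations s s.length) := by
  intro N
  induction N with
  | zero =>
      intro s hN _
      have : s = [] := List.length_eq_zero_iff.mp (by omega)
      subst this
      simp
  | succ N ih =>
      intro s hN hpair
      by_cases hs : s = []
      · subst hs; simp
      · obtain ⟨m, hm⟩ : ∃ m, s.length = m + 1 := by
          cases hlen : s.length
          · exact absurd (List.length_eq_zero_iff.mp hlen) hs
          · exact ⟨_, rfl⟩
        rw [perms_eq s hs, List.flatMap_def]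
        apply isChain_flatten
        · intro l hl
          obtain ⟨i, hi, rfl⟩ := List.mem_map.mp hl
          have hilt : i < s.length := List.mem_range.mp hi
          have hlen1 : (s.eraseIdx i).length = s.length - 1 := by
            rw [List.length_eraseIdx]; simp [hilt]
          simp only [blockP]
          rw [← hlen1]
          intro hcon
          exact P_ne _ (List.map_eq_nil_iff.mp hcon)
        · intro l hl
          obtain ⟨i, hi, rfl⟩ := List.mem_map.mp hl
          have hilt : i < s.length := List.mem_range.mp hi
          have hlen1 : (s.eraseIdx i).length = s.length - 1 := by
            rw [List.length_eraseIdx]; simp [hilt]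
          simp only [blockP]
          rw [← hlen1]
          apply (List.isChain_map _).mpr
          exact (ih (s.eraseIdx i) (by omega)
            (List.Pairwise.sublist (List.eraseIdx_sublist s i) hpair)).imp
            (fun a b hab => bangun_cons _ a b hab)
        · apply (List.isChain_map _).mpr
          rw [hm, List.isChain_range_succ]
          intro i hilt
          -- link between block i and block i+1
          have hi1 : i + 1 < s.length := by omega
          have hi0 : i < s.length := by omega
          have hlastB : (blockP s i).getLast?
              = some (s.getD i 0 :: (s.eraseIdx i).reverse) := by
            have hlen1 : (s.eraseIdx i).length = s.length - 1 := by
              rw [List.length_eraseIdx]; simp [hi0]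
            simp only [blockP]
            rw [← hlen1, List.getLast?_map, P_last (s.eraseIdx i).length _ le_rfl]
            rfl
          have hheadB : (blockP s (i + 1)).head?
              = some (s.getD (i + 1) 0 :: s.eraseIdx (i + 1)) := by
            have hlen1 : (s.eraseIdx (i + 1)).length = s.length - 1 := by
              rw [List.length_eraseIdx]; simp [hi1]
            simp only [blockP]
            rw [← hlen1, List.head?_map, P_head]
            rfl
          intro a ha b hb
          rw [hlastB] at ha
          rw [hheadB] at hb
          cases ha
          cases hb
          -- a = s[i] :: (s.eraseIdx i).reverse, b = s[i+1] :: s.eraseIdx (i+1)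
          have hgi : s.getD i 0 = s[i] := List.getD_eq_getElem _ _ hi0
          have hgi1 : s.getD (i + 1) 0 = s[i + 1] := List.getD_eq_getElem _ _ hi1
          have hd1 : s.eraseIdx i = s.take i ++ s[i + 1] :: s.drop (i + 2) := by
            rw [List.eraseIdx_eq_take_drop_succ, List.drop_eq_getElem_cons hi1]
          have hd2 : s.eraseIdx (i + 1) = s.take i ++ s[i] :: s.drop (i + 2) := by
            rw [List.eraseIdx_eq_take_drop_succ, List.take_add_one,
              List.getElem?_eq_getElem hi0, List.append_assoc]
            simp only [Option.toList_some, List.singleton_append]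
          rw [hgi, hgi1, hd1, hd2]
          have hrev : (s.take i ++ s[i + 1] :: s.drop (i + 2)).reverse
              = (s.drop (i + 2)).reverse ++ s[i + 1] :: (s.take i).reverse := by
            rw [List.reverse_append, List.reverse_cons, List.append_assoc,
              List.singleton_append]
          rw [hrev]
          apply bangun_pivot
          · exact List.Pairwise.sublist (List.take_sublist i s) hpair
          · exact List.Pairwise.sublist (List.drop_sublist (i + 2) s) hpair
          · intro a ha
            obtain ⟨j, hj, rfl⟩ := List.mem_iff_getElem.mp ha
            rw [List.getElem_take]
            exact List.pairwise_iff_getElem.mp hpair _ _ _ hi0 (by simp at hj; omega)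
          · exact List.pairwise_iff_getElem.mp hpair _ _ hi0 hi1 (by omega)
          · intro c hc
            obtain ⟨j, hj, rfl⟩ := List.mem_iff_getElem.mp hc
            rw [List.getElem_drop]
            exact List.pairwise_iff_getElem.mp hpair _ _ hi1 (by simp at hj; omega) (by omega)

-- the successor chain reproduces any bangun_permutasi-linked list
theorem chainA_eq : ∀ (L : List (List Int)) (fuel : Nat) (p : List Int),
    L.head? = some p → List.IsChain (fun a b => bangun_permutasi a = some b) L →
    (∀ q, L.getLast? = some q → bangun_permutasi q = none) →
    L.length ≤ fuel + 1 → chainA fuel p = L := by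
  intro L
  induction L with
  | nil => intro fuel p h _ _ _; cases h
  | cons p0 rest ih =>
      intro fuel p hh hch hlast hlen
      have hp : p = p0 := by cases hh; rfl
      subst hp
      cases rest with
      | nil =>
          have hb : bangun_permutasi p = none := hlast p (by rfl)
          simp [chainA, hb]
      | cons p1 rest2 =>
          have hb : bangun_permutasi p = some p1 := (List.isChain_cons_cons.mp hch).1
          obtain ⟨f, rfl⟩ : ∃ f, fuel = f + 1 := by
            cases fuel
            · exfalso; simp at hlen
            · exact ⟨_, rfl⟩
          have := ih f p1 rfl (List.isChain_cons_cons.mp hch).2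
            (fun q hq => hlast q (by rw [List.getLast?_cons_cons]; exact hq))
            (by simp only [List.length_cons] at hlen ⊢; omega)
          rw [chainA.eq_def, hb]
          exact congrArg (List.cons p) this

theorem main_eq (n : Nat) :
    semua_kemungkinan (n : Int)
      = PySem.List.permutations (PySem.List.pyRange 0 (n : Int) 1)
          (PySem.List.pyRange 0 (n : Int) 1).length := by
  have hlen : (PySem.List.pyRange 0 (n : Int) 1).length = n := by
    rw [PySem.List.length_pyRange_one]; omega
  have hpair : (PySem.List.pyRange 0 (n : Int) 1).Pairwise (· < ·) :=
    PySem.List.pairwise_lt_pyRange_one 0 (n : Int)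
  rw [semua_kemungkinan, Int.toNat_natCast]
  apply chainA_eq
  · exact P_head _
  · exact P_chain _ _ le_rfl hpair
  · intro q hq
    rw [P_last _ _ le_rfl] at hq
    cases hq
    exact bangun_none _ (List.pairwise_reverse.mpr (hpair.imp fun h => h))
  · rw [P_len _ _ le_rfl, hlen]
    omega

-- ---- B-side equivalences: validation ----

-- an all over range(len xs) of a predicate on xs[b] is an all over xs
theorem range_all_eq {α : Type} (xs : List α) (d : α) (g : α → Bool) :
    (PySem.List.pyRange 0 (PySem.List.len xs) 1).all (fun b => g (PySem.List.pyGetD xs b d))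
      = xs.all g := by
  conv_rhs => rw [← PySem.List.map_pyGetD_pyRange_zero xs d]
  rw [List.all_map]
  rfl

-- Bool all respects pointwise equality on members
theorem all_congr_mem {α : Type} (l : List α) (f g : α → Bool)
    (h : ∀ x ∈ l, f x = g x) : l.all f = l.all g := by
  induction l with
  | nil => rfl
  | cons x t ih =>
      simp only [List.all_cons, h x (by simp), ih (fun y hy => h y (by simp [hy]))]

-- a nested add-loop from any seed is one Set.update of the flattened value list
theorem foldl_foldl_add {β γ α : Type} [BEq α] (f : β → γ → α) (g : β → List γ) :
    ∀ (l : List β) (s : PySem.Set α),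
      l.foldl (fun s b => (g b).foldl (fun s k => PySem.Set.add s (f b k)) s) s
        = PySem.Set.update s (l.flatMap (fun b => (g b).map (f b))) := by
  intro l
  induction l with
  | nil => intro s; rw [List.foldl_nil, List.flatMap_nil, PySem.Set.update_nil]
  | cons b t ih =>
      intro s
      rw [List.foldl_cons, ih, ← PySem.Set.update_map_eq_foldl_add, List.flatMap_cons,
        PySem.Set.update_append]

theorem set_daerah_ofList (board : List (List String)) :
    set_daerah board
      = PySem.Set.ofList ((PySem.List.pyRange 0 (PySem.List.len board) 1).flatMap
          (fun b => (PySem.List.pyRange 0 (PySem.List.len board) 1).map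
            (fun k => pgS board b k))) := by
  rw [set_daerah]
  rw [foldl_foldl_add (fun b k => pgS board b k)
    (fun _ => PySem.List.pyRange 0 (PySem.List.len board) 1)]
  rfl

theorem pgS_elem (board : List (List String)) (bn kn : Nat) (hb : bn < board.length)
    (hk : kn < board[bn].length) : pgS board (bn : Int) (kn : Int) = board[bn][kn] := by
  rw [pgS, PySem.List.pyGetD_of_nonneg board [] (Int.natCast_nonneg _), Int.toNat_natCast,
    List.getD_eq_getElem board [] hb,
    PySem.List.pyGetD_of_nonneg _ _ (Int.natCast_nonneg _), Int.toNat_natCast,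
    List.getD_eq_getElem _ _ hk]

theorem daerah_members (board : List (List String))
    (hsq : ∀ row ∈ board, row.length = board.length) (x : String) :
    (x ∈ (PySem.List.pyRange 0 (PySem.List.len board) 1).flatMap
        (fun b => (PySem.List.pyRange 0 (PySem.List.len board) 1).map
          (fun k => pgS board b k)))
      ↔ x ∈ board.flatMap (fun row => row) := by
  simp only [List.mem_flatMap, List.mem_map, PySem.List.mem_pyRange_one, PySem.List.len_eq]
  constructor
  · rintro ⟨b, ⟨hb0, hbn⟩, k, ⟨hk0, hkn⟩, rfl⟩
    have hb : b.toNat < board.length := by omega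
    refine ⟨board[b.toNat], List.getElem_mem hb, ?_⟩
    have hk : k.toNat < board[b.toNat].length := by
      rw [hsq _ (List.getElem_mem hb)]; omega
    have he : pgS board b k = board[b.toNat][k.toNat] := by
      have h := pgS_elem board b.toNat k.toNat hb hk
      rwa [show ((b.toNat : Nat) : Int) = b by omega, show ((k.toNat : Nat) : Int) = k by omega] at h
    rw [he]
    exact List.getElem_mem hk
  · rintro ⟨row, hrow, hx⟩
    obtain ⟨bn, hb, rfl⟩ := List.mem_iff_getElem.mp hrow
    obtain ⟨kn, hk, rfl⟩ := List.mem_iff_getElem.mp hx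
    have hkn : kn < board.length := by
      rw [← hsq _ (List.getElem_mem hb)]; exact hk
    exact ⟨(bn : Int), ⟨by omega, by omega⟩, (kn : Int), ⟨by omega, by omega⟩,
      pgS_elem board bn kn hb hk⟩

theorem valid_eq (board : List (List String)) : validasi_input board = validBoardB board := by
  by_cases h0 : board.length = 0
  · have hb : board = [] := List.length_eq_zero_iff.mp h0
    subst hb
    decide
  · rw [validasi_input, validBoardB]
    by_cases hsq : ∀ row ∈ board, row.length = board.length
    case neg =>
      have hex : ∃ row ∈ board, ¬ row.length = board.length := by
        simpa using hsq
      have hall : (board.all fun row => (((row.length : Nat) : Int) == ((board.length : Nat) : Int)))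
          = false := by
        obtain ⟨row, hrow, hne⟩ := hex
        exact List.all_eq_false.mpr ⟨row, hrow, by simp; omega⟩
      simp [PySem.List.len_eq, hex, hall]
    case pos =>
      have hcells : ((PySem.List.pyRange 0 (PySem.List.len board) 1).all
            (fun b => (PySem.List.pyRange 0 (PySem.List.len board) 1).all (fun k =>
              let now := pgS board b k
              PySem.Str.len now == 1 &&
                (let c := now.toList.headD ' '; decide ('A' ≤ c) && decide (c ≤ 'Z')))))
          = board.all (fun row => row.all okCellB) := by
        have houter := range_all_eq board []
          (fun row => (PySem.List.pyRange 0 (PySem.List.len board) 1).all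
            (fun k => okCellB (PySem.List.pyGetD row k "")))
        rw [show (fun b => (PySem.List.pyRange 0 (PySem.List.len board) 1).all (fun k =>
              let now := pgS board b k
              PySem.Str.len now == 1 &&
                (let c := now.toList.headD ' '; decide ('A' ≤ c) && decide (c ≤ 'Z'))))
            = (fun b => (PySem.List.pyRange 0 (PySem.List.len board) 1).all
              (fun k => okCellB (PySem.List.pyGetD (PySem.List.pyGetD board b []) k ""))) from rfl]
        rw [houter]
        apply all_congr_mem
        intro row hrow
        have hlr : PySem.List.len board = PySem.List.len row := by
          simp only [PySem.List.len_eq]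
          rw [hsq row hrow]
        rw [hlr, range_all_eq row "" okCellB]
      have hset : (set_daerah board).length
          = (PySem.Set.ofList (board.flatMap (fun row => row))).length := by
        rw [set_daerah_ofList]
        apply List.Perm.length_eq
        apply (List.perm_ext_iff_of_nodup (PySem.Set.nodup_ofList _)
          (PySem.Set.nodup_ofList _)).mpr
        intro x
        rw [PySem.Set.mem_ofList, PySem.Set.mem_ofList]
        exact daerah_members board hsq x
      simp at hcells hset
      apply Bool.eq_iff_iff.mpr
      simp [PySem.List.len_eq, hcells, hset, List.all_eq_true]
      constructor
      · rintro ⟨hne, a, b, hc, d⟩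
        exact ⟨⟨⟨⟨by omega, hc⟩, a⟩, b⟩, d⟩
      · rintro ⟨⟨⟨⟨-, hc⟩, a⟩, b⟩, d⟩
        exact ⟨by intro h; exact h0 (by rw [h]; rfl), a, b, hc, d⟩

-- ---- B-side equivalences: one attempt ----

-- (ofList xs).length = xs.length iff xs has no duplicates
theorem ofList_len_iff {α : Type} [BEq α] [LawfulBEq α] (xs : List α) :
    (PySem.Set.ofList xs).length = xs.length ↔ xs.Nodup := by
  induction xs using List.reverseRecOn with
  | nil => simp [PySem.Set.ofList]
  | append_singleton ys y ih =>
      rw [PySem.Set.ofList_append_singleton]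
      by_cases hy : y ∈ ys
      · rw [PySem.Set.add_of_mem (by rw [PySem.Set.mem_ofList]; exact hy)]
        have hle := PySem.Set.length_ofList_le ys
        simp only [List.length_append, List.length_singleton]
        constructor
        · intro h; omega
        · intro h
          exact absurd hy (by simp [List.nodup_append] at h; tauto)
      · rw [PySem.Set.add_of_not_mem (by rw [PySem.Set.mem_ofList]; exact hy)]
        simp only [List.length_append, List.length_singleton, List.nodup_append]
        constructor
        · intro h
          refine ⟨ih.mp (by omega), by simp, ?_⟩
          intro a ha b hb
          simp only [List.mem_singleton] at hb
          subst hb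
          intro hab; subst hab; exact hy ha
        · rintro ⟨h1, -, -⟩
          rw [ih.mpr h1]

-- cek_daerah is the no-duplicate-colours test
theorem cek_daerah_go_iff (board : List (List String)) :
    ∀ (qs : List (Int × Int)) (s : PySem.Set String),
      cek_daerah_go board s qs = true ↔
        ((qs.map (fun q => pgS board q.1 q.2)).Nodup ∧
          ∀ c ∈ qs.map (fun q => pgS board q.1 q.2), c ∉ s) := by
  intro qs
  induction qs with
  | nil => intro s; simp [cek_daerah_go]
  | cons q rest ih =>
      intro s
      obtain ⟨b, k⟩ := q
      by_cases hc : PySem.Set.contains s (pgS board b k) = true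
      · simp only [cek_daerah_go, if_pos hc]
        have hmem : pgS board b k ∈ s := (PySem.Set.contains_iff _ _).mp hc
        simp only [List.map_cons, List.mem_cons]
        constructor
        · intro h; cases h
        · rintro ⟨-, h2⟩
          exact absurd hmem (h2 _ (Or.inl rfl))
      · simp only [cek_daerah_go, if_neg hc]
        have hnot : pgS board b k ∉ s := fun h => hc ((PySem.Set.contains_iff _ _).mpr h)
        rw [ih (PySem.Set.add s (pgS board b k))]
        simp only [List.map_cons, List.nodup_cons, List.mem_cons]
        constructor
        · rintro ⟨hnd, hall⟩
          have hhead : pgS board b k ∉ rest.map (fun q => pgS board q.1 q.2) := by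
            intro hmem
            exact (by simp [PySem.Set.mem_add] : pgS board b k ∈ PySem.Set.add s (pgS board b k))
              |> hall _ hmem
          exact ⟨⟨hhead, hnd⟩, by
            rintro c (rfl | hcm)
            · exact hnot
            · intro hcs
              exact hall c hcm ((PySem.Set.mem_add _ _ _).mpr (Or.inl hcs))⟩
        · rintro ⟨⟨hhead, hnd⟩, hall⟩
          refine ⟨hnd, ?_⟩
          intro c hcm hcadd
          rcases (PySem.Set.mem_add _ _ _).mp hcadd with hcs | rfl
          · exact hall c (Or.inr hcm) hcs
          · exact hhead hcm

theorem cek_daerah_eq (board : List (List String)) (queen : List (Int × Int)) :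
    cek_daerah board queen = decide (queen.map (fun q => pgS board q.1 q.2)).Nodup := by
  by_cases h : (queen.map (fun q => pgS board q.1 q.2)).Nodup
  · simp only [h, decide_true]
    exact (cek_daerah_go_iff board queen PySem.Set.empty).mpr ⟨h, by simp [PySem.Set.empty]⟩
  · simp only [h, decide_false]
    by_contra hcon
    rw [Bool.not_eq_false] at hcon
    exact h ((cek_daerah_go_iff board queen PySem.Set.empty).mp hcon).1

-- cek_kolom_baris holds for the queen built from a permutation
theorem ckb_go_true :
    ∀ (qs : List (Int × Int)) (baris kolom : PySem.Set Int),
      (qs.map Prod.fst).Nodup → (qs.map Prod.snd).Nodup →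
      (∀ b ∈ qs.map Prod.fst, b ∉ baris) → (∀ k ∈ qs.map Prod.snd, k ∉ kolom) →
      cek_kolom_baris_go baris kolom qs = true := by
  intro qs
  induction qs with
  | nil => intro _ _ _ _ _ _; rfl
  | cons q rest ih =>
      intro baris kolom h1 h2 h3 h4
      obtain ⟨b, k⟩ := q
      simp only [List.map_cons, List.nodup_cons, List.mem_cons] at h1 h2 h3 h4
      have hb : PySem.Set.contains baris b = false := by
        rw [← Bool.not_eq_true, PySem.Set.contains_iff]
        exact h3 b (Or.inl rfl)
      have hk : PySem.Set.contains kolom k = false := by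
        rw [← Bool.not_eq_true, PySem.Set.contains_iff]
        exact h4 k (Or.inl rfl)
      simp only [cek_kolom_baris_go, hb, hk, Bool.or_false, if_neg (by simp : ¬(false = true))]
      apply ih _ _ h1.2 h2.2
      · intro b' hb'
        rw [PySem.Set.mem_add]
        rintro (hmem | rfl)
        · exact h3 b' (Or.inr hb') hmem
        · exact h1.1 hb'
      · intro k' hk'
        rw [PySem.Set.mem_add]
        rintro (hmem | rfl)
        · exact h4 k' (Or.inr hk') hmem
        · exact h2.1 hk'

theorem cek_kolom_baris_perm (p : List Int) (n : Int) (hn : 0 ≤ n)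
    (hlen : (p.length : Int) = n) (hnd : p.Nodup) :
    cek_kolom_baris (PySem.List.enumerate p 0) n = true := by
  have hlq : (PySem.List.enumerate p 0).length = p.length := PySem.List.length_enumerate p 0
  rw [cek_kolom_baris]
  rw [if_neg]
  · apply ckb_go_true
    · rw [PySem.List.map_fst_enumerate]
      exact PySem.List.nodup_pyRange_one _ _
    · rw [PySem.List.map_snd_enumerate]
      exact hnd
    · intro b _ hb; cases hb
    · intro k _ hk; cases hk
  · simp only [PySem.List.len_eq, hlq, hlen, beq_self_eq_true, Bool.not_true]
    exact fun h => by cases h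

-- cek_tetangga on the queen of an (arbitrary) column list is the consecutive-gap test
theorem enum_mem_iff (p : List Int) (b k : Int) :
    (b, k) ∈ PySem.List.enumerate p 0 ↔
      ∃ (j : Nat) (_ : j < p.length), b = (j : Int) ∧ k = p[j] := by
  rw [PySem.List.mem_enumerate_iff]
  constructor
  · rintro ⟨j, h, heq⟩
    exact ⟨j, h, by simpa using congrArg Prod.fst heq, by simpa using congrArg Prod.snd heq⟩
  · rintro ⟨j, h, rfl, rfl⟩
    exact ⟨j, h, by simp⟩

theorem cek_tetangga_eq (p : List Int) :
    cek_tetangga (PySem.List.enumerate p 0)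
      = (p.zip (PySem.List.slice p (some 1) none)).all
          (fun q => decide (1 < (q.2 - q.1).natAbs)) := by
  rw [PySem.List.slice_from_one]
  -- the gap side, as a Prop over indices
  have Rhs : (p.zip p.tail).all (fun q => decide (1 < (q.2 - q.1).natAbs)) = true ↔
      ∀ (i : Nat), i + 1 < p.length → 1 < (p[i + 1]! - p[i]!).natAbs := by
    rw [List.all_eq_true]
    constructor
    · intro H i h
      have hz : i < (p.zip p.tail).length := by
        rw [List.length_zip, List.length_tail]; omega
      have := H (p.zip p.tail)[i] (List.getElem_mem hz)
      rw [List.getElem_zip, List.getElem_tail] at this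
      rw [getElem!_pos p (i+1) (by omega), getElem!_pos p i (by omega)]
      simpa using this
    · intro H q hq
      obtain ⟨i, hz, rfl⟩ := List.mem_iff_getElem.mp hq
      have hi : i + 1 < p.length := by
        rw [List.length_zip, List.length_tail] at hz; omega
      rw [List.getElem_zip, List.getElem_tail]
      have := H i hi
      rw [getElem!_pos p (i+1) (by omega), getElem!_pos p i (by omega)] at this
      simpa using this
  -- contains of the queen set is membership in the queen list
  have hcont : ∀ (x : Int × Int),
      PySem.Set.contains (PySem.Set.ofList (PySem.List.enumerate p 0)) x
        = decide (x ∈ PySem.List.enumerate p 0) := by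
    intro x
    by_cases hx : x ∈ PySem.List.enumerate p 0
    · rw [decide_eq_true hx]
      exact (PySem.Set.contains_iff _ _).mpr ((PySem.Set.mem_ofList _ _).mpr hx)
    · rw [decide_eq_false hx, ← Bool.not_eq_true]
      rw [PySem.Set.contains_iff, PySem.Set.mem_ofList]
      exact hx
  apply Bool.eq_iff_iff.mpr
  rw [Rhs]
  simp only [cek_tetangga, List.all_eq_true, hcont, Bool.or_eq_true, decide_eq_true_eq,
    Bool.not_eq_eq_eq_not, Bool.not_true, Bool.or_eq_false_iff, decide_eq_false_iff_not]
  constructor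
  · -- no neighbours in the queen set → adjacent column gaps exceed 1
    intro H i hi
    have hmem : ((i : Int), p[i]!) ∈ PySem.List.enumerate p 0 := by
      rw [getElem!_pos p i (by omega)]
      exact (enum_mem_iff p _ _).mpr ⟨i, by omega, rfl, rfl⟩
    obtain ⟨⟨⟨⟨⟨⟨⟨-, -⟩, -⟩, -⟩, -⟩, m6⟩, m7⟩, m8⟩ := H _ hmem
    by_contra hgap
    have hd : p[i + 1]! = p[i]! - 1 ∨ p[i + 1]! = p[i]! ∨ p[i + 1]! = p[i]! + 1 := by omega
    have hmem1 : ((i : Int) + 1, p[i + 1]!) ∈ PySem.List.enumerate p 0 := by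
      rw [getElem!_pos p (i+1) (by omega)]
      exact (enum_mem_iff p _ _).mpr ⟨i + 1, by omega, by push_cast; ring, rfl⟩
    rcases hd with hd | hd | hd
    · exact m6 (by rw [← hd]; exact hmem1)
    · exact m7 (by rw [← hd]; exact hmem1)
    · exact m8 (by rw [← hd]; exact hmem1)
  · -- adjacent column gaps exceed 1 → no neighbours in the queen set
    intro H q hq
    obtain ⟨b, k⟩ := q
    obtain ⟨j, hj, rfl, rfl⟩ := (enum_mem_iff p b k).mp hq
    have gapAt : ∀ (j' : Nat), j' + 1 < p.length → 1 < (p[j' + 1]! - p[j']!).natAbs := H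
    have hnotmem : ∀ (b k : Int), ((b, k) ∈ PySem.List.enumerate p 0) →
        ∃ (j' : Nat) (_ : j' < p.length), b = (j' : Int) ∧ k = p[j'] := by
      intro b k h
      exact (enum_mem_iff p b k).mp h
    refine ⟨⟨⟨⟨⟨⟨⟨?_, ?_⟩, ?_⟩, ?_⟩, ?_⟩, ?_⟩, ?_⟩, ?_⟩ <;>
      · intro hmem
        obtain ⟨j', hj', hb, hk⟩ := hnotmem _ _ hmem
        have hj'' : j' + 1 = j ∨ j' = j ∨ j' = j + 1 := by omega
        rcases hj'' with h | h | h
        · subst h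
          have := gapAt j' (by omega)
          rw [getElem!_pos p (j'+1) (by omega), getElem!_pos p j' (by omega)] at this
          omega
        · subst h
          omega
        · subst h
          have := gapAt j (by omega)
          rw [getElem!_pos p (j+1) (by omega), getElem!_pos p j (by omega)] at this
          omega

-- A's loop body equals B's loop body on permutations of range(n)
theorem loop_eq (board : List (List String)) (n : Int) (hn : n = (board.length : Int)) :
    ∀ (L : List (List Int)), (∀ p ∈ L, p.Perm (PySem.List.pyRange 0 n 1)) →
    ∀ (kasus : Int), loopYieldA board n kasus L = loopB board n kasus L := by
  intro L
  induction L with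
  | nil => intro _ _; rfl
  | cons perm rest ih =>
      intro hperm kasus
      have hp := hperm perm (by simp)
      have h0n : 0 ≤ n := by rw [hn]; exact Int.natCast_nonneg _
      have hlen : (perm.length : Int) = n := by
        have := hp.length_eq
        rw [PySem.List.length_pyRange_one] at this
        omega
      have hnd : perm.Nodup :=
        hp.nodup_iff.mpr (PySem.List.nodup_pyRange_one _ _)
      -- the two queen constructions coincide
      have hq : (PySem.List.pyRange 0 n 1).map (fun r => (r, pg perm r))
          = PySem.List.enumerate perm 0 := by
        rw [PySem.List.enumerate_eq_map_pyRange perm 0, PySem.List.len_eq, hlen]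
        rfl
      -- the two validity computations coincide
      have hval : (cek_daerah board ((PySem.List.pyRange 0 n 1).map (fun r => (r, pg perm r)))
            && cek_tetangga ((PySem.List.pyRange 0 n 1).map (fun r => (r, pg perm r)))
            && cek_kolom_baris ((PySem.List.pyRange 0 n 1).map (fun r => (r, pg perm r))) n)
          = attemptValidB board n perm (PySem.List.enumerate perm 0) := by
        rw [hq, cek_daerah_eq, cek_tetangga_eq,
          cek_kolom_baris_perm perm n h0n hlen hnd, Bool.and_true, attemptValidB]
        congr 1
        -- decide Nodup colours = (len(set(colours)) == n)
        have hcell : (fun q : Int × Int => cellB board q.1 q.2)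
            = (fun q : Int × Int => pgS board q.1 q.2) := rfl
        rw [hcell]
        have hcl : ((PySem.List.enumerate perm 0).map
            (fun q : Int × Int => pgS board q.1 q.2)).length = perm.length := by
          rw [List.length_map, PySem.List.length_enumerate]
        by_cases hnodup : ((PySem.List.enumerate perm 0).map
            (fun q : Int × Int => pgS board q.1 q.2)).Nodup
        · rw [decide_eq_true hnodup, PySem.List.len_eq,
            PySem.Set.ofList_eq_self_of_nodup _ hnodup, hcl, hlen]
          simp
        · rw [decide_eq_false hnodup]
          have hne := (not_iff_not.mpr (ofList_len_iff _)).mpr hnodup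
          have hle := PySem.Set.length_ofList_le ((PySem.List.enumerate perm 0).map
            (fun q : Int × Int => pgS board q.1 q.2))
          rw [PySem.List.len_eq]
          symm
          rw [beq_eq_false_iff_ne]
          omega
      rw [hq] at hval
      simp only [loopYieldA, loopB, hq, hval, ih (fun p hp => hperm p (by simp [hp]))]

-- ===== VERDICT (by name: the statement is the Claim_ definition above) =====
theorem langkah_bruteforce_spec : Claim_equal_langkah_bruteforce := by
  intro board skip_time _ _
  unfold Spec_langkah_bruteforce langkah_bruteforce langkah_bruteforce_alt
  rw [valid_eq]
  by_cases h : (!skip_time && !validBoardB board) = true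
  · rw [if_pos h, if_pos h]
  · rw [if_neg h, if_neg h]
    simp only [PySem.List.len_eq]
    rw [main_eq board.length]
    exact loop_eq board _ rfl _
      (fun p hp => PySem.List.perm_of_mem_permutations hp) 0
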